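-- pv_equiv track=rewrite | github.com/BilalNaseem1/mooc.fi_Intro_and_Advanced_Programming_in_Python | mooc-programming-23/part04-30_shortest_in_list/src/shortest_in_list.py | shortest
-- ===== SOURCE A (Python) =====
-- def shortest(lst):
--     j = []
--     for i in lst:
--         j.append(len(i))
--     m = []
--     for i in lst:
--         if len(i) == min(j):
--             m.append(i)
--         else:
--             pass
--     return m[0]
-- ===== SOURCE B (Python) =====
-- def shortest(lst):
--     best = lst[0]
--     for x in lst[1:]:
--         if len(x) < len(best):
--             best = x
--     return best
-- ===== Notes on version B (the rewrite author's own statement) =====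
-- stated objective: simpler
-- what changed: Replaces A's lengths-table plus min()-rescanning filter pass with a single accumulator pass keeping the running shortest element (strict < keeps the first of equal-length ties).
import Mathlib
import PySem

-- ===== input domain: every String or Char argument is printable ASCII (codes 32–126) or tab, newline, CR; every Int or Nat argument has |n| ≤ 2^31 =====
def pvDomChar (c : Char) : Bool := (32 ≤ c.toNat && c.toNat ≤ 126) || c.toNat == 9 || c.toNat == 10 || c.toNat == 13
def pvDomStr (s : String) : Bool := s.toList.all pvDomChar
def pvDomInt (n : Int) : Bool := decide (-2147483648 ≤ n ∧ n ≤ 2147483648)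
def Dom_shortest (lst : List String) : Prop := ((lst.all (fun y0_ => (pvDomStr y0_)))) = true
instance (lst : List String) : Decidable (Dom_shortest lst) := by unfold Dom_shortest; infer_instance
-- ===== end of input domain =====

-- B replaces A's lengths table + min()-rescanning filter pass with one running-shortest accumulator pass (simpler).

-- ===== PORT A =====
def shortest (lst : List String) : String :=
  let j : List Int := lst.foldl (fun acc i => acc ++ [PySem.Str.len i]) []
  let m : List String :=
    lst.foldl (fun acc i =>
      if PySem.Str.len i = (PySem.List.min? j (fun v => v)).getD 0 then acc ++ [i] else acc) []
  (PySem.List.pyGet? m 0).getD ""   -- m[0]; Pre_ guarantees it is in range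

-- ===== PORT B =====
def shortest_alt (lst : List String) : String :=
  match lst with
  | [] => ""   -- Source B's 'lst[0]' raises IndexError here; excluded by Pre_
  | x :: rest => rest.foldl (fun best y => if PySem.Str.len y < PySem.Str.len best then y else best) x

-- ===== PRECONDITION & SPEC =====
-- Python A raises IndexError (m[0] on the empty m) on the empty list, where B raises IndexError (lst[0]) too.
def Pre_shortest (lst : List String) : Prop := lst ≠ []
instance (lst : List String) : Decidable (Pre_shortest lst) := by unfold Pre_shortest; infer_instance
def pvWitness_shortest : List String := ["abc", "hi", "xy", "longer"]

def Spec_shortest (lst : List String) (out : String) : Prop := out = shortest_alt lst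
instance (lst : List String) (out : String) : Decidable (Spec_shortest lst out) := by unfold Spec_shortest; infer_instance

-- ===== CLAIM =====
def Claim_equal_shortest : Prop := ∀ (lst : List String), Dom_shortest lst → Pre_shortest lst → Spec_shortest lst (shortest lst)

-- ===== LEMMAS AND PROOFS =====

lemma foldl_min_le_init (l : List Int) (a : Int) : l.foldl min a ≤ a := by
  induction l generalizing a with
  | nil => simp
  | cons b t ih => exact le_trans (ih (min a b)) (min_le_left a b)

-- B's running-shortest fold is the head of A's filter of the min-length elements.
lemma first_min {α : Type} (f : α → Int) (rest : List α) (x : α) :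
    ∃ t, (x :: rest).filter (fun i => f i = (rest.map f).foldl min (f x))
      = rest.foldl (fun best y => if f y < f best then y else best) x :: t := by
  induction rest generalizing x with
  | nil => exact ⟨[], by simp⟩
  | cons y r ih =>
    simp only [List.map_cons, List.foldl_cons]
    have hc : (r.map f).foldl min (min (f x) (f y)) ≤ min (f x) (f y) := foldl_min_le_init _ _
    by_cases hyx : f y < f x
    · have hmin : min (f x) (f y) = f y := by omega
      obtain ⟨t, ht⟩ := ih y
      refine ⟨t, ?_⟩
      simp only [hmin] at hc ⊢
      rw [List.filter_cons, if_neg (by simp; omega), if_pos hyx]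
      exact ht
    · have hmin : min (f x) (f y) = f x := by omega
      obtain ⟨t, ht⟩ := ih x
      simp only [hmin] at hc ⊢
      rw [if_neg hyx]
      by_cases hy : f y = (r.map f).foldl min (f x)
      · have hx : f x = (r.map f).foldl min (f x) := by omega
        have hfold : r.foldl (fun best y => if f y < f best then y else best) x = x := by
          rw [List.filter_cons, if_pos (by simpa using hx)] at ht
          exact ((List.cons_eq_cons.mp ht).1).symm
        exact ⟨y :: r.filter (fun i => f i = (r.map f).foldl min (f x)), by
          rw [List.filter_cons, if_pos (by simpa using hx),
              List.filter_cons, if_pos (by simpa using hy), hfold]⟩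
      · refine ⟨t, ?_⟩
        have hdrop : List.filter (fun i => decide (f i = (r.map f).foldl min (f x))) (y :: r)
            = List.filter (fun i => decide (f i = (r.map f).foldl min (f x))) r := by
          rw [List.filter_cons, if_neg (by simpa using hy)]
        rw [List.filter_cons, hdrop]
        rw [List.filter_cons] at ht
        exact ht

-- ===== VERDICT =====
theorem shortest_spec : Claim_equal_shortest := by
  intro lst _ hpre
  unfold Spec_shortest
  match lst, hpre with
  | x :: rest, _ =>
    obtain ⟨t, ht⟩ := first_min PySem.Str.len rest x
    simp only [shortest, shortest_alt,
      PySem.List.foldl_append_singleton_eq_map, List.nil_append, List.map_cons,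
      PySem.List.min?_id_cons, Option.getD_some,
      PySem.List.foldl_append_ite_eq_filter]
    rw [ht, PySem.List.pyGet?_zero_cons, Option.getD_some]
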